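-- pv_equiv track=rewrite | github.com/Bucha11/axor-core | axor_core/policy/topics.py | _build_synonym_map
-- ===== SOURCE A (Python) =====
-- def _build_word_topics(topics: dict[str, set[str]]) -> dict[str, set[str]]:
--     """Inverted index: word → set of topics it belongs to."""
--     inv: dict[str, set[str]] = {}
--     for topic, words in topics.items():
--         for w in words:
--             inv.setdefault(w, set()).add(topic)
--     return inv
--
-- def _build_synonym_map(
--     topics: dict[str, set[str]],
--     implications: dict[str, list[str]],
-- ) -> dict[str, set[str]]:
--     """
--     Per-word synonym universe. Each word resolves to the union of:
--       (a) every topic it directly belongs to, plus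
--       (b) every topic implied by those topics (one hop).
--     """
--     word_topics = _build_word_topics(topics)
--     m: dict[str, set[str]] = {}
--     for word, ts in word_topics.items():
--         universe: set[str] = set()
--         for t in ts:
--             universe |= topics[t]
--             for implied in implications.get(t, []):
--                 universe |= topics.get(implied, set())
--         m[word] = universe
--     return m
-- ===== SOURCE B (Python) =====
-- def _build_expanded(
--     topics: dict[str, set[str]],
--     implications: dict[str, list[str]],
-- ) -> dict[str, set[str]]:
--     """Per-topic one-hop expansion: topic's own words plus each implied topic's words."""
--     expanded: dict[str, set[str]] = {}
--     for t, words in topics.items():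
--         e = set(words)
--         for implied in implications.get(t, []):
--             e |= topics.get(implied, set())
--         expanded[t] = e
--     return expanded
--
-- def _build_synonym_map(
--     topics: dict[str, set[str]],
--     implications: dict[str, list[str]],
-- ) -> dict[str, set[str]]:
--     # No inverted index: precompute each topic's expansion once, then scatter it
--     # over the topic's words, accumulating directly into the word map.
--     expanded = _build_expanded(topics, implications)
--     m: dict[str, set[str]] = {}
--     for t, words in topics.items():
--         for w in words:
--             m.setdefault(w, set()).update(expanded[t])
--     return m
-- ===== Notes on version B (the rewrite author's own statement) =====
-- stated objective: alternative
-- what changed: B drops A's inverted word->topics index and per-word gather; it precomputes each topic's one-hop expansion once and scatters it over the topic's words, accumulating directly into the word map.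
import Mathlib
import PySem

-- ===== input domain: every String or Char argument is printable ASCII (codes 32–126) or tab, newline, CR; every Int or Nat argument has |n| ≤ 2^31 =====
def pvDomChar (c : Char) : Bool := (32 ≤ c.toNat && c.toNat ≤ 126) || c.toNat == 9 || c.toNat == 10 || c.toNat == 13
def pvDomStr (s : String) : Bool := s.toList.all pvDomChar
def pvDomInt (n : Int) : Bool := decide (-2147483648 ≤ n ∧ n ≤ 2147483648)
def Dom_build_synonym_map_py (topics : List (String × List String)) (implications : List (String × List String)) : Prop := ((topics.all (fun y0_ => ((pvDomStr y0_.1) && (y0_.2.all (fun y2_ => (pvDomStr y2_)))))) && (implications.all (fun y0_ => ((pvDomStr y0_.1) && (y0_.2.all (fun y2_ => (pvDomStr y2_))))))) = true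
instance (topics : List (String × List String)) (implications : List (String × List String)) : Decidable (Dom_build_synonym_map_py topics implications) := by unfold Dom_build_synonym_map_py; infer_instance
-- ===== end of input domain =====

-- B replaces A's inverted index (word → topics, then a per-word gather) by a per-topic
-- expansion table scattered over each topic's words (objective: alternative decomposition).

-- ===== PORT A =====
-- _build_word_topics: inv.setdefault(w, set()).add(topic) = store the grown set back at w's position
def build_word_topics (topics : List (String × List String)) : PySem.Dict String (PySem.Set String) :=
  topics.foldl (fun inv e =>
    e.2.foldl (fun inv w =>
      PySem.Dict.insert inv w (PySem.Set.add (PySem.Dict.getD inv w PySem.Set.empty) e.1)) inv)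
    PySem.Dict.empty

-- topics[t] for t coming out of word_topics is ported as getD with default []; such a t is
-- always a key of topics, so the default is never consulted and no KeyError can occur.
def build_synonym_map_py (topics : List (String × List String)) (implications : List (String × List String)) : List (String × List String) :=
  let topicsD := PySem.Dict.mk topics
  let implD := PySem.Dict.mk implications
  let word_topics := build_word_topics topics
  let m : PySem.Dict String (PySem.Set String) :=
    word_topics.items.foldl (fun m p =>
      PySem.Dict.insert m p.1
        (p.2.foldl (fun u t =>
          (PySem.Dict.getD implD t []).foldl
            (fun u implied => PySem.Set.update u (PySem.Dict.getD topicsD implied PySem.Set.empty))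
            (PySem.Set.update u (PySem.Dict.getD topicsD t PySem.Set.empty)))
        PySem.Set.empty))
    PySem.Dict.empty
  m.items

-- ===== PORT B =====
-- _build_expanded
def build_expanded (topics : List (String × List String)) (implications : List (String × List String)) : PySem.Dict String (PySem.Set String) :=
  topics.foldl (fun ex e =>
    PySem.Dict.insert ex e.1
      ((PySem.Dict.getD (PySem.Dict.mk implications) e.1 []).foldl
        (fun s implied => PySem.Set.update s (PySem.Dict.getD (PySem.Dict.mk topics) implied PySem.Set.empty))
        (PySem.Set.ofList e.2)))
  PySem.Dict.empty

def build_synonym_map_py_alt (topics : List (String × List String)) (implications : List (String × List String)) : List (String × List String) :=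
  let expanded := build_expanded topics implications
  let m : PySem.Dict String (PySem.Set String) :=
    topics.foldl (fun m e =>
      e.2.foldl (fun m w =>
        PySem.Dict.insert m w
          (PySem.Set.update (PySem.Dict.getD m w PySem.Set.empty) (PySem.Dict.getD expanded e.1 PySem.Set.empty))) m)
    PySem.Dict.empty
  m.items

-- ===== PRECONDITION & SPEC =====
-- Pre_ excludes association lists with a duplicated topic key: a real Python dict cannot
-- contain one, and on such lists A's first-match lookup and B's last-write expansion table
-- pick different entries for the duplicated key.
def Pre_build_synonym_map_py (topics : List (String × List String)) (implications : List (String × List String)) : Prop :=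
  (topics.map Prod.fst).Nodup
instance (topics : List (String × List String)) (implications : List (String × List String)) : Decidable (Pre_build_synonym_map_py topics implications) := by unfold Pre_build_synonym_map_py; infer_instance

def pvWitness_build_synonym_map_py : (List (String × List String)) × (List (String × List String)) :=
  ([("t1", ["a", "b"]), ("t2", ["b"])], [("t1", ["t2"])])

def Spec_build_synonym_map_py (topics : List (String × List String)) (implications : List (String × List String)) (out : List (String × List String)) : Prop := out = build_synonym_map_py_alt topics implications
instance (topics : List (String × List String)) (implications : List (String × List String)) (out : List (String × List String)) : Decidable (Spec_build_synonym_map_py topics implications out) := by unfold Spec_build_synonym_map_py; infer_instance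

-- ===== CLAIM (what is proved, stated in full; the proofs are below) =====
def Claim_equal_build_synonym_map_py : Prop := ∀ (topics : List (String × List String)) (implications : List (String × List String)), Dom_build_synonym_map_py topics implications → Pre_build_synonym_map_py topics implications → Spec_build_synonym_map_py topics implications (build_synonym_map_py topics implications)

-- ===== LEMMAS AND PROOFS =====

-- The common canonical value: for each word, fold A's raw expansion step over the topics
-- entries whose word set contains it (in topics order).
def pvStep (topics implications : List (String × List String)) (u : PySem.Set String) (e : String × List String) : PySem.Set String :=
  (PySem.Dict.getD (PySem.Dict.mk implications) e.1 []).foldl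
    (fun u implied => PySem.Set.update u (PySem.Dict.getD (PySem.Dict.mk topics) implied PySem.Set.empty))
    (PySem.Set.update u e.2)

def pvVal (topics implications : List (String × List String)) (w : String) : PySem.Set String :=
  (topics.filter (fun e => decide (w ∈ e.2))).foldl (pvStep topics implications) PySem.Set.empty

def pvCanon (topics implications : List (String × List String)) : List (String × List String) :=
  (PySem.Set.ofList (topics.flatMap Prod.snd)).map (fun w => (w, pvVal topics implications w))

-- ---- Set facts specific to this file ----
lemma set_add_idem (u : PySem.Set String) (x : String) :
    PySem.Set.add (PySem.Set.add u x) x = PySem.Set.add u x := by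
  apply PySem.Set.add_of_mem
  simp [PySem.Set.mem_add]

lemma set_update_add (u s : PySem.Set String) (y : String) :
    PySem.Set.update u (PySem.Set.add s y) = PySem.Set.add (PySem.Set.update u s) y := by
  by_cases h : y ∈ s
  · rw [PySem.Set.add_of_mem h, PySem.Set.add_of_mem]
    rw [PySem.Set.mem_update]; exact Or.inr h
  · rw [PySem.Set.add_of_not_mem h, PySem.Set.update_append, PySem.Set.update_cons, PySem.Set.update_nil]

lemma set_update_update (u s : PySem.Set String) (l : List String) :
    PySem.Set.update u (PySem.Set.update s l) = PySem.Set.update (PySem.Set.update u s) l := by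
  induction l generalizing s with
  | nil => simp [PySem.Set.update_nil]
  | cons x l ih =>
      rw [PySem.Set.update_cons, ih, set_update_add, PySem.Set.update_cons]

lemma set_update_ofList (u : PySem.Set String) (l : List String) :
    PySem.Set.update u (PySem.Set.ofList l) = PySem.Set.update u l := by
  rw [← PySem.Set.update_nil_left, set_update_update, PySem.Set.update_nil]

lemma set_update_of_forall_mem (s : PySem.Set String) (l : List String) (h : ∀ x ∈ l, x ∈ s) :
    PySem.Set.update s l = s := by
  induction l generalizing s with
  | nil => rw [PySem.Set.update_nil]
  | cons x l ih =>
      rw [PySem.Set.update_cons, PySem.Set.add_of_mem (h x (by simp))]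
      exact ih s (fun y hy => h y (by simp [hy]))

lemma set_update_idem (u : PySem.Set String) (l : List String) :
    PySem.Set.update (PySem.Set.update u l) l = PySem.Set.update u l := by
  apply set_update_of_forall_mem
  intro x hx
  rw [PySem.Set.mem_update]; exact Or.inr hx

lemma set_update_foldl (g : String → PySem.Set String) (l : List String) (u s0 : PySem.Set String) :
    PySem.Set.update u (l.foldl (fun s i => PySem.Set.update s (g i)) s0)
      = l.foldl (fun v i => PySem.Set.update v (g i)) (PySem.Set.update u s0) := by
  induction l generalizing s0 u with
  | nil => rfl
  | cons x l ih => simp only [List.foldl_cons, ih, set_update_update]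

-- ---- the generic scatter loop:  for e in topics: for w in e.2: m[w] = f e (m.get(w, ∅)) ----
lemma inner_getD (g : PySem.Set String → PySem.Set String) (hg : ∀ u, g (g u) = g u)
    (ws : List String) (m : PySem.Dict String (PySem.Set String)) (w : String) :
    PySem.Dict.getD (ws.foldl (fun m w' => PySem.Dict.insert m w' (g (PySem.Dict.getD m w' PySem.Set.empty))) m) w PySem.Set.empty
      = if w ∈ ws then g (PySem.Dict.getD m w PySem.Set.empty) else PySem.Dict.getD m w PySem.Set.empty := by
  induction ws generalizing m with
  | nil => simp
  | cons x ws ih =>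
      simp only [List.foldl_cons, ih, PySem.Dict.getD_insert, List.mem_cons]
      by_cases hwx : w = x
      · subst hwx; simp [hg]
      · simp [hwx]

lemma scatter_getD (f : (String × List String) → PySem.Set String → PySem.Set String)
    (hf : ∀ e u, f e (f e u) = f e u)
    (topics : List (String × List String)) (d : PySem.Dict String (PySem.Set String)) (w : String) :
    PySem.Dict.getD
      (topics.foldl (fun m e =>
        e.2.foldl (fun m w' => PySem.Dict.insert m w' (f e (PySem.Dict.getD m w' PySem.Set.empty))) m) d)
      w PySem.Set.empty
      = (topics.filter (fun e => decide (w ∈ e.2))).foldl (fun u e => f e u) (PySem.Dict.getD d w PySem.Set.empty) := by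
  induction topics generalizing d with
  | nil => rfl
  | cons e topics ih =>
      simp only [List.foldl_cons, List.filter_cons]
      rw [ih, inner_getD (f e) (hf e)]
      by_cases hw : w ∈ e.2 <;> simp [hw]

lemma scatter_keys (f : (String × List String) → PySem.Set String → PySem.Set String)
    (topics : List (String × List String)) (d : PySem.Dict String (PySem.Set String)) :
    (topics.foldl (fun m e =>
        e.2.foldl (fun m w' => PySem.Dict.insert m w' (f e (PySem.Dict.getD m w' PySem.Set.empty))) m) d).keys
      = PySem.Set.update d.keys (topics.flatMap Prod.snd) := by
  induction topics generalizing d with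
  | nil => simp [PySem.Set.update_nil]
  | cons e topics ih =>
      rw [List.foldl_cons, ih, List.flatMap_cons, PySem.Set.update_append,
        PySem.Dict.keys_foldl_insert]

-- items of a scatter loop from the empty dict, as a map over the distinct words
lemma scatter_items (f : (String × List String) → PySem.Set String → PySem.Set String)
    (hf : ∀ e u, f e (f e u) = f e u)
    (topics : List (String × List String)) :
    (topics.foldl (fun m e =>
        e.2.foldl (fun m w' => PySem.Dict.insert m w' (f e (PySem.Dict.getD m w' PySem.Set.empty))) m)
      PySem.Dict.empty).items
      = (PySem.Set.ofList (topics.flatMap Prod.snd)).map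
          (fun w => (w, (topics.filter (fun e => decide (w ∈ e.2))).foldl (fun u e => f e u) PySem.Set.empty)) := by
  have hkeys := scatter_keys f topics PySem.Dict.empty
  rw [PySem.Dict.keys_empty, PySem.Set.update_nil_left] at hkeys
  rw [PySem.Dict.items_eq_map_keys _ (by rw [hkeys]; exact PySem.Set.nodup_ofList _) PySem.Set.empty, hkeys]
  apply List.map_congr_left
  intro w _
  rw [scatter_getD f hf topics PySem.Dict.empty w, PySem.Dict.getD_empty]

-- first-match lookup in topics at the key of one of its entries, when keys are unique
lemma getD_mk_of_mem (topics : List (String × List String)) (e : String × List String)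
    (hnd : (topics.map Prod.fst).Nodup) (he : e ∈ topics) :
    PySem.Dict.getD (PySem.Dict.mk topics) e.1 PySem.Set.empty = e.2 :=
  PySem.Dict.getD_of_mem_items (PySem.Dict.mk topics) he hnd PySem.Set.empty

-- ---- characterization of port A ----
lemma build_word_topics_items (topics : List (String × List String)) :
    (build_word_topics topics).items
      = (PySem.Set.ofList (topics.flatMap Prod.snd)).map
          (fun w => (w, PySem.Set.ofList ((topics.filter (fun e => decide (w ∈ e.2))).map Prod.fst))) := by
  unfold build_word_topics
  rw [scatter_items (fun e u => PySem.Set.add u e.1) (fun e u => set_add_idem u e.1) topics]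
  apply List.map_congr_left
  intro w _
  refine congrArg (fun v => (w, v)) ?_
  rw [PySem.Set.ofList_eq_foldl, List.foldl_map]
  rfl

lemma port_a_eq_canon (topics implications : List (String × List String))
    (hnd : (topics.map Prod.fst).Nodup) :
    build_synonym_map_py topics implications = pvCanon topics implications := by
  simp only [build_synonym_map_py]
  rw [PySem.Dict.items_foldl_insert_fresh ((build_word_topics topics).items) Prod.fst _ PySem.Dict.empty
    (fun p _ => PySem.Dict.contains_empty _)
    (by show ((build_word_topics topics).items.map Prod.fst).Nodup
        rw [build_word_topics_items, List.map_map,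
          show (Prod.fst ∘ fun w => ((w : String), PySem.Set.ofList ((topics.filter (fun e => decide (w ∈ e.2))).map Prod.fst))) = id from rfl,
          List.map_id]
        exact PySem.Set.nodup_ofList (topics.flatMap Prod.snd))]
  rw [show (PySem.Dict.empty : PySem.Dict String (PySem.Set String)).items = [] from rfl,
    List.nil_append, build_word_topics_items, List.map_map, pvCanon]
  apply List.map_congr_left
  intro w _
  simp only [Function.comp]
  refine congrArg (fun v => (w, v)) ?_
  have hsub : ((topics.filter (fun e => decide (w ∈ e.2))).map Prod.fst).Nodup :=
    hnd.sublist (List.Sublist.map Prod.fst List.filter_sublist)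
  rw [PySem.Set.ofList_eq_self_of_nodup _ hsub, List.foldl_map, pvVal]
  apply PySem.List.foldl_congr_mem
  intro acc e hef
  have hmem : e ∈ topics := List.mem_of_mem_filter hef
  rw [getD_mk_of_mem topics e hnd hmem, pvStep]

-- ---- characterization of port B ----
def pvExp (topics implications : List (String × List String)) (e : String × List String) : PySem.Set String :=
  (PySem.Dict.getD (PySem.Dict.mk implications) e.1 []).foldl
    (fun s implied => PySem.Set.update s (PySem.Dict.getD (PySem.Dict.mk topics) implied PySem.Set.empty))
    (PySem.Set.ofList e.2)

lemma build_expanded_items (topics implications : List (String × List String))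
    (hnd : (topics.map Prod.fst).Nodup) :
    (build_expanded topics implications).items = topics.map (fun e => (e.1, pvExp topics implications e)) := by
  unfold build_expanded
  rw [PySem.Dict.items_foldl_insert_fresh topics Prod.fst _ PySem.Dict.empty
    (fun p _ => PySem.Dict.contains_empty _) hnd]
  rw [show (PySem.Dict.empty : PySem.Dict String (PySem.Set String)).items = [] from rfl, List.nil_append]
  rfl

lemma getD_build_expanded (topics implications : List (String × List String))
    (hnd : (topics.map Prod.fst).Nodup) (e : String × List String) (he : e ∈ topics) :
    PySem.Dict.getD (build_expanded topics implications) e.1 PySem.Set.empty = pvExp topics implications e := by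
  apply PySem.Dict.getD_of_mem_items
  · rw [show (build_expanded topics implications).items = _ from build_expanded_items topics implications hnd]
    exact List.mem_map_of_mem he
  · show ((build_expanded topics implications).items.map Prod.fst).Nodup
    rw [build_expanded_items topics implications hnd, List.map_map]
    exact hnd

lemma set_update_pvExp (topics implications : List (String × List String))
    (e : String × List String) (u : PySem.Set String) :
    PySem.Set.update u (pvExp topics implications e) = pvStep topics implications u e := by
  rw [pvExp, set_update_foldl, set_update_ofList, pvStep]

lemma port_b_eq_canon (topics implications : List (String × List String))
    (hnd : (topics.map Prod.fst).Nodup) :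
    build_synonym_map_py_alt topics implications = pvCanon topics implications := by
  simp only [build_synonym_map_py_alt]
  rw [scatter_items (fun e u => PySem.Set.update u (PySem.Dict.getD (build_expanded topics implications) e.1 PySem.Set.empty))
       (fun e u => set_update_idem u _) topics]
  apply List.map_congr_left
  intro w _
  refine congrArg (fun v => (w, v)) ?_
  rw [pvVal]
  apply PySem.List.foldl_congr_mem
  intro acc e hef
  have hmem : e ∈ topics := List.mem_of_mem_filter hef
  rw [getD_build_expanded topics implications hnd e hmem, set_update_pvExp]

-- ===== VERDICT (by name: the statement is the Claim_ definition above) =====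
theorem build_synonym_map_py_spec : Claim_equal_build_synonym_map_py := by
  intro topics implications _ hpre
  unfold Spec_build_synonym_map_py
  rw [port_a_eq_canon topics implications hpre, port_b_eq_canon topics implications hpre]
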